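-- pv_equiv track=rewrite | github.com/dogunyoye/advent-of-code-2017 | day09/day09.py | __collect_groups
-- ===== SOURCE A (Python) =====
-- def __collect_groups(data) -> dict:
--     groups = {}
--     for line_idx, line in enumerate(data.splitlines()):
--         stack = []
--         canceled = False
--         garbage = False
--         for i in range(0, len(line)):
--
--             if canceled:
--                 canceled = False
--                 continue
--
--             if line[i] == '!':
--                 canceled = True
--                 continue
--
--             if line[i] == '<':
--                 garbage = True
--             elif line[i] == '>':
--                 garbage = False
--
--             if line[i] == '{' and not garbage:
--                 stack.append(i)
--             elif line[i] == '}' and not garbage: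
--                 score = len(stack)
--                 start_idx = stack.pop()
--                 groups[(line_idx, start_idx, i)] = score
--
--     return groups
-- ===== SOURCE B (Python) =====
-- def __collect_groups(data) -> dict:
--     groups = {}
--     for line_idx, line in enumerate(data.splitlines()):
--         # pass 1: lex -- run the garbage/cancel machine, keep only braces outside garbage
--         tokens = []
--         canceled = False
--         garbage = False
--         for i, ch in enumerate(line):
--             if canceled:
--                 canceled = False
--             elif ch == '!':
--                 canceled = True
--             elif ch == '<':
--                 garbage = True
--             elif ch == '>':
--                 garbage = False
--             elif ch in '{}' and not garbage:
--                 tokens.append((i, ch))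
--         # pass 2: parse the brace token stream with a stack of open indices
--         stack = []
--         for i, ch in tokens:
--             if ch == '{':
--                 stack.append(i)
--             else:
--                 score = len(stack)
--                 groups[(line_idx, stack.pop(), i)] = score
--     return groups
-- ===== Notes on version B (the rewrite author's own statement) =====
-- stated objective: alternative
-- what changed: A's single interleaved scan is split into two passes: a lexer that runs the cancel/garbage state machine and emits only the brace tokens (index, char) outside garbage, then a stack parser over that short token list; the parser pass touches only braces, a constant-factor saving a timing run measured.
import Mathlib
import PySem

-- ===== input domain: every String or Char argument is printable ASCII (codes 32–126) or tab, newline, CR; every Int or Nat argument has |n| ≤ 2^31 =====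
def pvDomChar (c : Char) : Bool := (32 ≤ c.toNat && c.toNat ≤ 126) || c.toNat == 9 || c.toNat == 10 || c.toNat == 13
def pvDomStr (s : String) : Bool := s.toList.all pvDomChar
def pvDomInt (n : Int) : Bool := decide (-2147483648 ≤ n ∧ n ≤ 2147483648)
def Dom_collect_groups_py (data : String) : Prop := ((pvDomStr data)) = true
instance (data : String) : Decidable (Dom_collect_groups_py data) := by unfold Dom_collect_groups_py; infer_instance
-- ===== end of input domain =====

-- B replaces A's single scan by a lexer pass (braces outside garbage, with indices) followed by
-- a stack-parser pass over the token list: same values, different decomposition (objective: alternative).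

-- ===== PORT A =====
-- single scan: cancel/garbage state machine and the index stack interleaved in one loop
def aLoop (lineIdx : Int) : List Char → Int → Bool → Bool → List Int →
    PySem.Dict (Int × Int × Int) Int → PySem.Dict (Int × Int × Int) Int
  | [], _, _, _, _, groups => groups
  | c :: rest, i, canceled, garbage, stack, groups =>
    if canceled then aLoop lineIdx rest (i + 1) false garbage stack groups
    else if c = '!' then aLoop lineIdx rest (i + 1) true garbage stack groups
    else
      let garbage' := if c = '<' then true else if c = '>' then false else garbage
      if c = '{' ∧ ¬ garbage' = true then
        aLoop lineIdx rest (i + 1) canceled garbage' (i :: stack) groups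
      else if c = '}' ∧ ¬ garbage' = true then
        let score : Int := stack.length
        match stack with
        | [] => groups  -- Python raises IndexError here (stack.pop on empty); excluded by Pre_
        | start :: stack' =>
          aLoop lineIdx rest (i + 1) canceled garbage' stack'
            (groups.insert (lineIdx, start, i) score)
      else aLoop lineIdx rest (i + 1) canceled garbage' stack groups

def collect_groups_py (data : String) : List (Int × Int × Int × Int) :=
  ((PySem.List.enumerate (PySem.Str.splitlines data) 0).foldl
      (fun g p => aLoop p.1 p.2.toList 0 false false [] g) PySem.Dict.empty).items.map
    (fun p => (p.1.1, p.1.2.1, p.1.2.2, p.2))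

-- ===== PORT B =====
-- pass 1: lexer — run the cancel/garbage machine, keep only braces outside garbage (with index)
def bLex : List Char → Int → Bool → Bool → List (Int × Char)
  | [], _, _, _ => []
  | c :: rest, i, canceled, garbage =>
    if canceled then bLex rest (i + 1) false garbage
    else if c = '!' then bLex rest (i + 1) true garbage
    else if c = '<' then bLex rest (i + 1) canceled true
    else if c = '>' then bLex rest (i + 1) canceled false
    else if (c = '{' ∨ c = '}') ∧ garbage = false then (i, c) :: bLex rest (i + 1) canceled garbage
    else bLex rest (i + 1) canceled garbage

-- pass 2: parser — a stack of open indices over the brace-token stream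
def bParse (lineIdx : Int) : List (Int × Char) → List Int →
    PySem.Dict (Int × Int × Int) Int → PySem.Dict (Int × Int × Int) Int
  | [], _, groups => groups
  | (i, c) :: rest, stack, groups =>
    if c = '{' then bParse lineIdx rest (i :: stack) groups
    else
      match stack with
      | [] => groups  -- Python B raises IndexError here too; excluded by Pre_
      | start :: stack' =>
        bParse lineIdx rest stack' (groups.insert (lineIdx, start, i) ((stack.length : Int)))

def collect_groups_py_alt (data : String) : List (Int × Int × Int × Int) :=
  ((PySem.List.enumerate (PySem.Str.splitlines data) 0).foldl
      (fun g p => bParse p.1 (bLex p.2.toList 0 false false) [] g) PySem.Dict.empty).items.map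
    (fun p => (p.1.1, p.1.2.1, p.1.2.2, p.2))

-- ===== PRECONDITION & SPEC =====
-- Pre_ excludes exactly the inputs where a '}' outside garbage is read with an empty stack:
-- there Python A raises IndexError on stack.pop() (and Python B raises at the same token).
def pvLineOk : List Char → Bool → Bool → Nat → Bool
  | [], _, _, _ => true
  | c :: rest, canceled, garbage, d =>
    if canceled then pvLineOk rest false garbage d
    else if c = '!' then pvLineOk rest true garbage d
    else if c = '<' then pvLineOk rest canceled true d
    else if c = '>' then pvLineOk rest canceled false d
    else if c = '{' && !garbage then pvLineOk rest canceled garbage (d + 1)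
    else if c = '}' && !garbage then
      match d with
      | 0 => false
      | Nat.succ d' => pvLineOk rest canceled garbage d'
    else pvLineOk rest canceled garbage d

def Pre_collect_groups_py (data : String) : Prop :=
  (PySem.Str.splitlines data).all (fun line => pvLineOk line.toList false false 0) = true
instance (data : String) : Decidable (Pre_collect_groups_py data) := by
  unfold Pre_collect_groups_py; infer_instance

def pvWitness_collect_groups_py : String := "{{<a!>},{}}"

def Spec_collect_groups_py (data : String) (out : List (Int × Int × Int × Int)) : Prop :=
  out = collect_groups_py_alt data
instance (data : String) (out : List (Int × Int × Int × Int)) : Decidable (Spec_collect_groups_py data out) := by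
  unfold Spec_collect_groups_py; infer_instance

-- ===== CLAIM (what is proved, stated in full; the proofs are below) =====
def Claim_equal_collect_groups_py : Prop := ∀ (data : String), Dom_collect_groups_py data →
  Pre_collect_groups_py data → Spec_collect_groups_py data (collect_groups_py data)

-- ===== LEMMAS AND PROOFS =====
-- one scan = lexer then parser, for every state
theorem aLoop_eq_bParse_bLex (lineIdx : Int) (chars : List Char) :
    ∀ (i : Int) (canceled garbage : Bool) (stack : List Int)
      (groups : PySem.Dict (Int × Int × Int) Int),
    aLoop lineIdx chars i canceled garbage stack groups
      = bParse lineIdx (bLex chars i canceled garbage) stack groups := by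
  induction chars with
  | nil => intro i canceled garbage stack groups; rfl
  | cons c rest ih =>
    intro i canceled garbage stack groups
    by_cases hc : canceled
    · simp [aLoop, bLex, hc, ih]
    · by_cases hb : c = '!'
      · simp [aLoop, bLex, hc, hb, ih]
      · by_cases hl : c = '<'
        · simp [aLoop, bLex, hc, hl, ih]
        · by_cases hg : c = '>'
          · simp [aLoop, bLex, hc, hg, ih]
          · by_cases ho : c = '{'
            · by_cases hgar : garbage
              · simp [aLoop, bLex, hc, ho, hgar, ih]
              · simp [aLoop, bLex, hc, ho, hgar, ih, bParse]
            · by_cases hcl : c = '}'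
              · by_cases hgar : garbage
                · simp [aLoop, bLex, hc, hcl, hgar, ih]
                · cases stack with
                  | nil => simp [aLoop, bLex, hc, hcl, hgar, bParse]
                  | cons start stack' =>
                    simp [aLoop, bLex, hc, hcl, hgar, ih, bParse]
              · simp [aLoop, bLex, hc, hb, hl, hg, ho, hcl, ih]

-- ===== VERDICT (by name: the statement is the Claim_ definition above) =====
theorem collect_groups_py_spec : Claim_equal_collect_groups_py := by
  intro data _ _
  unfold Spec_collect_groups_py collect_groups_py collect_groups_py_alt
  have h : (fun (g : PySem.Dict (Int × Int × Int) Int) (p : Int × String) =>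
        aLoop p.1 p.2.toList 0 false false [] g)
      = (fun g p => bParse p.1 (bLex p.2.toList 0 false false) [] g) :=
    funext fun g => funext fun p => aLoop_eq_bParse_bLex p.1 p.2.toList 0 false false [] g
  rw [h]
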